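-- pv_equiv track=rewrite | github.com/Parag7823/friendly-greetings-launchpad | test_enhanced_working.py | _group_events_by_file
-- ===== SOURCE A (Python) =====
-- def _group_events_by_file(events):
--     """Group events by source filename"""
--     events_by_file = {}
--     for event in events:
--         filename = event.get('source_filename', 'unknown')
--         if filename not in events_by_file:
--             events_by_file[filename] = []
--         events_by_file[filename].append(event)
--     return events_by_file
-- ===== SOURCE B (Python) =====
-- def _group_events_by_file(events):
--     """Group events by source filename"""
--     order = []
--     for event in events:
--         filename = event.get('source_filename', 'unknown')
--         if filename not in order:
--             order.append(filename)
--     return {f: [e for e in events if e.get('source_filename', 'unknown') == f]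
--             for f in order}
-- ===== Notes on version B (the rewrite author's own statement) =====
-- stated objective: alternative
-- what changed: Instead of accumulating groups into a dict in one scan, B first collects the distinct filenames in order of first occurrence and then builds each group by filtering the whole event list per filename.
import Mathlib
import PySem

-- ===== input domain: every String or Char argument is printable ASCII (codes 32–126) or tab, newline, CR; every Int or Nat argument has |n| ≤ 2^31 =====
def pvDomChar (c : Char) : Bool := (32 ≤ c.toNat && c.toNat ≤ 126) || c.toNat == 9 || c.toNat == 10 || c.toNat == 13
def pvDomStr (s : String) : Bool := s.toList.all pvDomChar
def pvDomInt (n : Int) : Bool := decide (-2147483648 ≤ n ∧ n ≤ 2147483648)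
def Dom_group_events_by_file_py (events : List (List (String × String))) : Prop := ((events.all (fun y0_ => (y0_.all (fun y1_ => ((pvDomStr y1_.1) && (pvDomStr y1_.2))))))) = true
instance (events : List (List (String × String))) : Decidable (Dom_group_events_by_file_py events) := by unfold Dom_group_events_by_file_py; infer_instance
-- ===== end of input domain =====

-- B replaces A's one-pass dict accumulation by a two-pass scheme (dedup the
-- filenames in first-occurrence order, then filter the events once per
-- filename): an alternative decomposition, not faster.

-- shared helper: event.get('source_filename', 'unknown') (both Pythons perform this lookup)
def pvKey (e : List (String × String)) : String :=
  PySem.Dict.getD (PySem.Dict.mk e) "source_filename" "unknown"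

-- ===== PORT A =====
def group_events_by_file_py (events : List (List (String × String))) : List (String × List (List (String × String))) :=
  (events.foldl (fun d e =>
      let filename := pvKey e
      let d' := if PySem.Dict.contains d filename then d
                else PySem.Dict.insert d filename []
      -- events_by_file[filename].append(event): key is present here, so this is modify
      PySem.Dict.modify d' filename [] (fun l => l ++ [e]))
    PySem.Dict.empty).items

-- ===== PORT B =====
def group_events_by_file_py_alt (events : List (List (String × String))) : List (String × List (List (String × String))) :=
  let order := events.foldl (fun acc e =>
      let filename := pvKey e
      if filename ∈ acc then acc else acc ++ [filename]) []
  order.map (fun f => (f, events.filter (fun e => pvKey e == f)))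

-- ===== PRECONDITION & SPEC =====
def Spec_group_events_by_file_py (events : List (List (String × String))) (out : List (String × List (List (String × String)))) : Prop := out = group_events_by_file_py_alt events
instance (events : List (List (String × String))) (out : List (String × List (List (String × String)))) : Decidable (Spec_group_events_by_file_py events out) := by unfold Spec_group_events_by_file_py; infer_instance

-- ===== CLAIM (what is proved, stated in full; the proofs are below) =====
def Claim_equal_group_events_by_file_py : Prop := ∀ (events : List (List (String × String))), Dom_group_events_by_file_py events → Spec_group_events_by_file_py events (group_events_by_file_py events)

-- ===== LEMMAS AND PROOFS =====

-- A's loop body ('ensure the key exists, then append') is exactly a modify with default [].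
theorem pv_step_eq_modify (d : PySem.Dict String (List (List (String × String)))) (e : List (String × String)) :
    (let filename := pvKey e
     let d' := if PySem.Dict.contains d filename then d
               else PySem.Dict.insert d filename []
     PySem.Dict.modify d' filename [] (fun l => l ++ [e]))
    = PySem.Dict.modify d (pvKey e) [] (fun l => l ++ [e]) := by
  by_cases h : PySem.Dict.contains d (pvKey e) = true
  · simp [h]
  · simp only [Bool.not_eq_true] at h
    simp only [h, Bool.false_eq_true, if_false, PySem.Dict.modify,
      PySem.Dict.getD_insert_self, PySem.Dict.insert_insert_self,
      PySem.Dict.getD_of_not_contains d [] h]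

-- A's whole fold, rewritten to the bare modify-fold.
theorem pv_foldA_eq (events : List (List (String × String))) (d : PySem.Dict String (List (List (String × String)))) :
    events.foldl (fun d e =>
      let filename := pvKey e
      let d' := if PySem.Dict.contains d filename then d
                else PySem.Dict.insert d filename []
      PySem.Dict.modify d' filename [] (fun l => l ++ [e])) d
    = events.foldl (fun d e => PySem.Dict.modify d (pvKey e) [] (fun l => l ++ [e])) d := by
  induction events generalizing d with
  | nil => rfl
  | cons e es ih => simp only [List.foldl_cons, pv_step_eq_modify]; try exact ih _

-- B's first pass computes the set of keys (first occurrences, in order).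
theorem pv_order_eq (events : List (List (String × String))) :
    events.foldl (fun acc e =>
      let filename := pvKey e
      if filename ∈ acc then acc else acc ++ [filename]) []
    = PySem.Set.ofList (events.map pvKey) := by
  have h1 : events.foldl (fun acc e =>
      let filename := pvKey e
      if filename ∈ acc then acc else acc ++ [filename]) []
      = events.foldl (fun acc e => PySem.Set.add acc (pvKey e)) [] := by
    induction events using List.reverseRecOn with
    | nil => rfl
    | append_singleton es e ih => simp only [List.foldl_append, List.foldl_cons, List.foldl_nil, ih, PySem.Set.add_eq_ite]
  rw [h1, ← PySem.Set.update_map_eq_foldl_add, PySem.Set.update_nil_left]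

theorem pv_main (events : List (List (String × String))) :
    group_events_by_file_py events = group_events_by_file_py_alt events := by
  unfold group_events_by_file_py group_events_by_file_py_alt
  rw [pv_foldA_eq, pv_order_eq]
  have hfm : events.foldl (fun d e => PySem.Dict.modify d (pvKey e) [] (fun l => l ++ [e])) PySem.Dict.empty
      = (events.map (fun e => (pvKey e, e))).foldl (fun d p => PySem.Dict.modify d p.1 [] (fun l => l ++ [p.2])) PySem.Dict.empty := by
    rw [List.foldl_map]
  have hnd : (events.foldl (fun d e => PySem.Dict.modify d (pvKey e) [] (fun l => l ++ [e])) PySem.Dict.empty).keys.Nodup := by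
    exact PySem.Dict.nodup_keys_foldl_modify_key events pvKey []
      (fun d e l => l ++ [e]) PySem.Dict.empty (by simp)
  rw [PySem.Dict.items_eq_map_keys _ hnd []]
  have hkeys : (events.foldl (fun d e => PySem.Dict.modify d (pvKey e) [] (fun l => l ++ [e])) PySem.Dict.empty).keys
      = PySem.Set.ofList (events.map pvKey) := by
    rw [PySem.Dict.keys_foldl_modify_key events pvKey [] (fun d e l => l ++ [e]) PySem.Dict.empty]
    simp [PySem.Dict.keys_empty, PySem.Set.update_nil_left]
  rw [hkeys]
  apply List.map_congr_left
  intro k _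
  refine Prod.ext rfl ?_
  rw [hfm, PySem.Dict.getD_foldl_modify_append, PySem.Dict.getD_empty]
  simp only [List.filter_map, List.map_map, List.nil_append]
  simp [Function.comp_def]

-- ===== VERDICT (by name: the statement is the Claim_ definition above) =====
theorem group_events_by_file_py_spec : Claim_equal_group_events_by_file_py := by
  intro events _
  unfold Spec_group_events_by_file_py
  exact pv_main events
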